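-- pv_equiv track=rewrite | github.com/tristanqtn/Hack-Haven | challs/404CTF/petit_bain/challenge.py | inverse_permute
-- ===== SOURCE A (Python) =====
-- def inverse_permute(permuted_message):
--     # This is the permutation used in the original permute function
--     p = [4, 3, 0, 5, 1, 2, 10, 9, 6, 11, 7, 8, 16, 15, 12, 17, 13, 14, 22, 21, 18, 23, 19, 20, 28, 27, 24, 29, 25, 26, 34, 33, 30, 35, 31, 32, 40, 39, 36, 41, 37, 38, 46, 45, 42, 47, 43, 44]
--     # Create an empty list to store the inverse permutation
--     inverse_p = [0] * len(p)
--
--     # Compute the inverse permutation indices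
--     for index, value in enumerate(p):
--         inverse_p[value] = index
--
--     # Use the inverse permutation indices to reorder the message back to its original order
--     original_message = [''] * len(permuted_message)
--     for i in range(len(permuted_message)):
--         original_message[inverse_p[i]] = permuted_message[i]
--
--     return ''.join(original_message)
-- ===== SOURCE B (Python) =====
-- def inverse_permute(permuted_message):
--     # The permutation is block-structured: within each 6-char block the original
--     # character k comes from position q[k] of that block (q = [4,3,0,5,1,2]).
--     # So undo it chunk by chunk, with no 48-entry table and no inverse pass.
--     q = (4, 3, 0, 5, 1, 2)
--     out = []
--     for b in range(0, len(permuted_message), 6):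
--         chunk = permuted_message[b:b + 6]
--         out.append(''.join(chunk[j] for j in q))
--     return ''.join(out)
-- ===== Notes on version B (the rewrite author's own statement) =====
-- stated objective: simpler
-- what changed: B exploits that the 48-entry table is 8 copies of the block pattern [4,3,0,5,1,2] shifted by 6: it un-permutes the message chunk-by-chunk in blocks of 6, with no inverse-table construction and no scatter write-pass.
import Mathlib
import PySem

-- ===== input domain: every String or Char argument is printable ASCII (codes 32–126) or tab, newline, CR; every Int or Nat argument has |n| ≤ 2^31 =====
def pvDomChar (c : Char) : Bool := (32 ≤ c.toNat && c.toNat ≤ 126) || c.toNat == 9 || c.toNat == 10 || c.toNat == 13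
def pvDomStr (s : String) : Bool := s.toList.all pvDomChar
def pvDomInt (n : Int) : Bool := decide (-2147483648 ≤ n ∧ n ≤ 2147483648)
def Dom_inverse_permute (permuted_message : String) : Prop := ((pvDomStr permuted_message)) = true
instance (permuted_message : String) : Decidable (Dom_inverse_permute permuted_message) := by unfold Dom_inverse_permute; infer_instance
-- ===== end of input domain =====

-- B replaces A's 48-entry inverse-table construction and scatter write-pass by
-- chunk-wise recursion over blocks of 6 characters (the table is 8 shifted copies
-- of one 6-element block pattern); same return value on every input A returns on.

-- ===== PORT A =====
-- the fixed permutation table of the Python A, verbatim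
def pvP : List Nat := [4, 3, 0, 5, 1, 2, 10, 9, 6, 11, 7, 8, 16, 15, 12, 17, 13, 14, 22, 21, 18, 23, 19, 20, 28, 27, 24, 29, 25, 26, 34, 33, 30, 35, 31, 32, 40, 39, 36, 41, 37, 38, 46, 45, 42, 47, 43, 44]

def inverse_permute (permuted_message : String) : String :=
  let p := pvP
  -- inverse_p = [0]*len(p); for index, value in enumerate(p): inverse_p[value] = index
  let inverse_p := (PySem.List.enumerate p 0).foldl
      (fun acc iv => acc.set iv.2 iv.1) (List.replicate p.length (0 : Int))
  let cs := permuted_message.toList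
  -- original_message = ['']*n; for i in range(n): original_message[inverse_p[i]] = permuted_message[i]
  -- (inverse_p holds only nonnegative indices, so .toNat is exact here; under
  --  Pre_ every written index is in range, matching where the Python returns)
  let original_message := (List.range cs.length).foldl
      (fun acc i => acc.set (inverse_p.getD i 0).toNat (cs.getD i ' ')) (List.replicate cs.length ' ')
  String.mk original_message

-- ===== PORT B =====
-- B's loop over blocks of 6: each chunk [a,b,c,d,e,f] contributes [e,d,a,f,b,c]
-- (chunk[j] for j in (4,3,0,5,1,2)); on a short trailing chunk Python B raises,
-- which only happens outside Pre_, so that branch yields [].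
def pvUnshuffle : List Char → List Char
  | a :: b :: c :: d :: e :: f :: rest => e :: d :: a :: f :: b :: c :: pvUnshuffle rest
  | _ => []

def inverse_permute_alt (permuted_message : String) : String :=
  String.mk (pvUnshuffle permuted_message.toList)

-- ===== PRECONDITION & SPEC =====
-- Pre_ holds exactly where the Python A returns: on any other length A raises
-- IndexError (a written index falls outside the message), so nothing A returns on is excluded.
def Pre_inverse_permute (permuted_message : String) : Prop :=
  permuted_message.toList.length % 6 = 0 ∧ permuted_message.toList.length ≤ 48
instance (permuted_message : String) : Decidable (Pre_inverse_permute permuted_message) := by unfold Pre_inverse_permute; infer_instance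
def pvWitness_inverse_permute : String := "abcdef"
def Spec_inverse_permute (permuted_message : String) (out : String) : Prop := out = inverse_permute_alt permuted_message
instance (permuted_message : String) (out : String) : Decidable (Spec_inverse_permute permuted_message out) := by unfold Spec_inverse_permute; infer_instance

-- ===== CLAIM (what is proved, stated in full; the proofs are below) =====
def Claim_equal_inverse_permute : Prop := ∀ (permuted_message : String), Dom_inverse_permute permuted_message → Pre_inverse_permute permuted_message → Spec_inverse_permute permuted_message (inverse_permute permuted_message)

-- ===== LEMMAS AND PROOFS =====

-- the literal value of A's inverse table (closed: it does not depend on the input)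
def pvInv : List Int := [2, 4, 5, 1, 0, 3, 8, 10, 11, 7, 6, 9, 14, 16, 17, 13, 12, 15, 20, 22, 23, 19, 18, 21, 26, 28, 29, 25, 24, 27, 32, 34, 35, 31, 30, 33, 38, 40, 41, 37, 36, 39, 44, 46, 47, 43, 42, 45]

theorem fact_inv_lt : ∀ n < 48, (pvInv.getD n 0).toNat < 48 := by decide
theorem fact_p_inv : ∀ n < 48, pvP.getD (pvInv.getD n 0).toNat 0 = n := by decide
theorem fact_inv_p : ∀ k < 48, (pvInv.getD (pvP.getD k 0) 0).toNat = k := by decide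
theorem fact_p_block : ∀ k < 48, pvP.getD k 0 < 6 * (k / 6) + 6 := by decide
theorem fact_p_shift : ∀ k, 6 ≤ k → k < 48 → pvP.getD k 0 = pvP.getD (k - 6) 0 + 6 := by decide

theorem getD_set (l : List Char) (i j : Nat) (a : Char) :
    (l.set i a).getD j ' ' = if i = j ∧ i < l.length then a else l.getD j ' ' := by
  simp only [List.getD_eq_getElem?_getD, List.getElem?_set]
  split_ifs <;> simp_all
  omega

theorem fold_length (cs : List Char) (n : Nat) (init : List Char) :
    ((List.range n).foldl
      (fun acc i => acc.set (pvInv.getD i 0).toNat (cs.getD i ' ')) init).length = init.length := by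
  induction n generalizing init with
  | zero => rfl
  | succ n ih =>
    rw [List.range_succ, List.foldl_append]
    simp only [List.foldl_cons, List.foldl_nil, List.length_set]
    exact ih init

theorem fold_getD (cs : List Char) (n : Nat) (hn : n ≤ 48) (init : List Char) (k : Nat)
    (hk : k < init.length) :
    ((List.range n).foldl
      (fun acc i => acc.set (pvInv.getD i 0).toNat (cs.getD i ' ')) init).getD k ' ' =
    if k < 48 ∧ pvP.getD k 0 < n then cs.getD (pvP.getD k 0) ' ' else init.getD k ' ' := by
  induction n with
  | zero => simp
  | succ n ih =>
    rw [List.range_succ, List.foldl_append]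
    simp only [List.foldl_cons, List.foldl_nil]
    rw [getD_set, fold_length, ih (by omega)]
    by_cases hjk : (pvInv.getD n 0).toNat = k
    · have hpk : pvP.getD k 0 = n := by rw [← hjk]; exact fact_p_inv n (by omega)
      have hk48 : k < 48 := by rw [← hjk]; exact fact_inv_lt n (by omega)
      rw [if_pos ⟨hjk, by omega⟩, if_pos ⟨hk48, by omega⟩, hpk]
    · rw [if_neg (by tauto)]
      have hne : ¬ (k < 48 ∧ pvP.getD k 0 = n) := by
        rintro ⟨h48, hpk⟩
        exact hjk (by rw [← hpk]; exact fact_inv_p k h48)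
      by_cases hc : k < 48 ∧ pvP.getD k 0 < n
      · rw [if_pos hc, if_pos ⟨hc.1, by omega⟩]
      · rw [if_neg hc, if_neg (by rintro ⟨h48, hlt⟩; exact hc ⟨h48, by rcases Nat.lt_succ_iff_lt_or_eq.mp hlt with h | h; exact h; exact absurd ⟨h48, h⟩ hne⟩)]

theorem unshuffle_length (cs : List Char) (h6 : cs.length % 6 = 0) :
    (pvUnshuffle cs).length = cs.length := by
  fun_induction pvUnshuffle cs with
  | case1 a b c d e f rest ih =>
    simp only [List.length_cons] at *
    omega
  | case2 l hl =>
    match l, hl with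
    | [], _ => rfl
    | [a], h => simp at h6
    | [a,b], h => simp at h6
    | [a,b,c], h => simp at h6
    | [a,b,c,d], h => simp at h6
    | [a,b,c,d,e], h => simp at h6
    | a::b::c::d::e::f::r, h => exact absurd rfl (h a b c d e f r)

theorem unshuffle_getD (cs : List Char) (h6 : cs.length % 6 = 0) (h48 : cs.length ≤ 48)
    (k : Nat) (hk : k < cs.length) :
    (pvUnshuffle cs).getD k ' ' = cs.getD (pvP.getD k 0) ' ' := by
  fun_induction pvUnshuffle cs generalizing k with
  | case1 a b c d e f rest ih =>
    simp only [List.length_cons] at h6 h48 hk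
    by_cases h : k < 6
    · interval_cases k <;> rfl
    · have hks : pvP.getD k 0 = pvP.getD (k - 6) 0 + 6 :=
        fact_p_shift k (by omega) (by omega)
      have := ih (by omega) (by omega) (k - 6) (by omega)
      have h6k : ∀ (xs : List Char) (x1 x2 x3 x4 x5 x6 : Char) (m : Nat),
          (x1::x2::x3::x4::x5::x6::xs).getD (m + 6) ' ' = xs.getD m ' ' := by
        intro xs x1 x2 x3 x4 x5 x6 m
        simp [List.getD_eq_getElem?_getD]
      calc (e::d::a::f::b::c::pvUnshuffle rest).getD k ' '
          = (e::d::a::f::b::c::pvUnshuffle rest).getD ((k - 6) + 6) ' ' := by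
            congr 1; omega
        _ = (pvUnshuffle rest).getD (k - 6) ' ' := h6k _ e d a f b c (k - 6)
        _ = rest.getD (pvP.getD (k - 6) 0) ' ' := this
        _ = (a::b::c::d::e::f::rest).getD (pvP.getD (k - 6) 0 + 6) ' ' :=
            (h6k _ a b c d e f _).symm
        _ = (a::b::c::d::e::f::rest).getD (pvP.getD k 0) ' ' := by rw [hks]
  | case2 l hl =>
    match l, hl with
    | [], _ => simp at hk
    | [a], h => simp at h6
    | [a,b], h => simp at h6
    | [a,b,c], h => simp at h6
    | [a,b,c,d], h => simp at h6
    | [a,b,c,d,e], h => simp at h6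
    | a::b::c::d::e::f::r, h => exact absurd rfl (h a b c d e f r)

-- ===== VERDICT (by name: the statement is the Claim_ definition above) =====
theorem inverse_permute_spec : Claim_equal_inverse_permute := by
  intro s _ hpre
  obtain ⟨hmod, hle⟩ := hpre
  unfold Spec_inverse_permute inverse_permute inverse_permute_alt
  show String.mk ((List.range s.toList.length).foldl
      (fun acc i => acc.set (pvInv.getD i 0).toNat (s.toList.getD i ' '))
      (List.replicate s.toList.length ' '))
    = String.mk (pvUnshuffle s.toList)
  set cs := s.toList
  set n := cs.length with hn
  apply congrArg String.mk
  apply List.ext_getElem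
  · rw [fold_length, List.length_replicate, unshuffle_length cs hmod]
  · intro k h1 h2
    have hkn : k < n := by
      rw [fold_length cs n] at h1
      simpa using h1
    have hA : _ = _ := fold_getD cs n hle (List.replicate n ' ') k (by simp [hkn])
    rw [if_pos ⟨by omega, by have := fact_p_block k (by omega); omega⟩] at hA
    calc _ = ((List.range n).foldl
        (fun acc i => acc.set (pvInv.getD i 0).toNat (cs.getD i ' ')) (List.replicate n ' ')).getD k ' ' := by
          rw [List.getD_eq_getElem?_getD, List.getElem?_eq_getElem h1]; rfl
      _ = cs.getD (pvP.getD k 0) ' ' := hA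
      _ = (pvUnshuffle cs).getD k ' ' := (unshuffle_getD cs hmod hle k hkn).symm
      _ = _ := by rw [List.getD_eq_getElem?_getD, List.getElem?_eq_getElem h2]; rfl
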